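-- pv_equiv track=rewrite | github.com/doctry/QFT-mapping | benchmark/original/EDA_traditional/convert2qasm.py | getQasmBit
-- ===== SOURCE A (Python) =====
-- from typing import Any, Dict, List
--
-- def getQasmBit(bits: List[str],qcBit2qasmBit: Dict[str,int], qasmBit: int) -> List[int]:
--     result = []
--     for bit in bits:
--         if bit not in qcBit2qasmBit.keys():
--             qcBit2qasmBit[bit] = qasmBit
--             result.append(qasmBit)
--             qasmBit +=1
--         else:
--             result.append(qcBit2qasmBit[bit])
--     return result, qasmBit
-- ===== SOURCE B (Python) =====
-- def getQasmBit(bits, qcBit2qasmBit, qasmBit):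
--     # Collect the distinct names not yet in the table, in first-seen order.
--     new_names = []
--     for bit in bits:
--         if bit not in qcBit2qasmBit and bit not in new_names:
--             new_names.append(bit)
--     # Each new name's id is qasmBit plus its position among the new names.
--     result = [qcBit2qasmBit[bit] if bit in qcBit2qasmBit else qasmBit + new_names.index(bit)
--               for bit in bits]
--     # Reproduce A's side effect on the table.
--     for i, name in enumerate(new_names):
--         qcBit2qasmBit[name] = qasmBit + i
--     return result, qasmBit + len(new_names)
-- ===== Notes on version B (the rewrite author's own statement) =====
-- stated objective: alternative
-- what changed: B never interleaves table mutation with output: it first collects the distinct not-yet-known names into a list, then computes each output id arithmetically as qasmBit plus the name's position in that list (or the existing table value), instead of A's single loop that inserts into the dict and appends as it goes.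
import Mathlib
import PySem

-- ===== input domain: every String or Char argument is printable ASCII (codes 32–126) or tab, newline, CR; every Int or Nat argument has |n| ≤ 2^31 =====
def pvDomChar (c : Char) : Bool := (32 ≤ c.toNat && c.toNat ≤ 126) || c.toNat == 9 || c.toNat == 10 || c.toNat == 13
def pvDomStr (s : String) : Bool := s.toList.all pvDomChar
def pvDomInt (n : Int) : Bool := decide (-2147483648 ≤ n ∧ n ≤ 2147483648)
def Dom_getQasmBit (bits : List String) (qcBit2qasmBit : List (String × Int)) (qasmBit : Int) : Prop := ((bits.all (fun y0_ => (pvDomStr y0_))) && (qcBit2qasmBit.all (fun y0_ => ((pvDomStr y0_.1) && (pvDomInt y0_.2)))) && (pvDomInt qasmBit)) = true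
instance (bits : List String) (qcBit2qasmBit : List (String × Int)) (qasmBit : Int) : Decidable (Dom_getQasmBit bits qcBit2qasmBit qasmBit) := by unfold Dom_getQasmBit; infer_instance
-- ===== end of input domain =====

-- B replaces A's interleaved dict-insert/append loop by: collect distinct unknown names into a list,
-- then compute each id arithmetically as qasmBit + position in that list (or the existing table value);
-- objective: alternative decomposition. Both Pythons mutate qcBit2qasmBit identically; the equivalence
-- proved here is about the return value.


-- ===== PORT A =====
-- A's single loop: for each bit, if absent assign fresh id into the dict and append it, else append the lookup.
def getQasmBitGo (bits : List String) (d : PySem.Dict String Int) (qasmBit : Int) : List Int × Int :=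
  match bits with
  | [] => ([], qasmBit)
  | bit :: rest =>
    if !(d.contains bit) then
      let r := getQasmBitGo rest (d.insert bit qasmBit) (qasmBit + 1)
      (qasmBit :: r.1, r.2)
    else
      let r := getQasmBitGo rest d qasmBit
      (d.getD bit 0 :: r.1, r.2)

def getQasmBit (bits : List String) (qcBit2qasmBit : List (String × Int)) (qasmBit : Int) : List Int × Int :=
  getQasmBitGo bits (PySem.Dict.ofList qcBit2qasmBit) qasmBit

-- ===== PORT B =====
-- Source B's first loop: collect the distinct names not in the table, in first-seen order.
def collectNew (bits : List String) (d : PySem.Dict String Int) (acc : List String) : List String :=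
  match bits with
  | [] => acc
  | bit :: rest =>
    if !(d.contains bit) && !(acc.contains bit) then collectNew rest d (acc ++ [bit])
    else collectNew rest d acc

-- Source B's comprehension: table lookup, or qasmBit + new_names.index(bit).
-- (.getD 0 totalizes Python's .index, which Source B never calls on an absent name.)
def getQasmBit_alt (bits : List String) (qcBit2qasmBit : List (String × Int)) (qasmBit : Int) : List Int × Int :=
  let d := PySem.Dict.ofList qcBit2qasmBit
  let newNames := collectNew bits d []
  (bits.map (fun bit =>
      match d.get? bit with
      | some v => v
      | none => qasmBit + (((PySem.List.index? newNames bit).getD 0 : Nat) : Int)),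
   qasmBit + (newNames.length : Int))

-- ===== PRECONDITION & SPEC =====
def Spec_getQasmBit (bits : List String) (qcBit2qasmBit : List (String × Int)) (qasmBit : Int) (out : List Int × Int) : Prop := out = getQasmBit_alt bits qcBit2qasmBit qasmBit
instance (bits : List String) (qcBit2qasmBit : List (String × Int)) (qasmBit : Int) (out : List Int × Int) : Decidable (Spec_getQasmBit bits qcBit2qasmBit qasmBit out) := by unfold Spec_getQasmBit; infer_instance

-- ===== CLAIM (what is proved, stated in full; the proofs are below) =====
def Claim_equal_getQasmBit : Prop := ∀ (bits : List String) (qcBit2qasmBit : List (String × Int)) (qasmBit : Int), Dom_getQasmBit bits qcBit2qasmBit qasmBit → Spec_getQasmBit bits qcBit2qasmBit qasmBit (getQasmBit bits qcBit2qasmBit qasmBit)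

-- ===== LEMMAS AND PROOFS =====

-- Proof-side characterisation of collectNew: the sublist of first occurrences satisfying a
-- predicate that shrinks as names are taken.
def freshList : List String → (String → Bool) → List String
  | [], _ => []
  | x :: r, p => if p x then x :: freshList r (fun y => p y && !(y == x)) else freshList r p

theorem freshList_congr (bits : List String) (p q : String → Bool)
    (h : ∀ x ∈ bits, p x = q x) : freshList bits p = freshList bits q := by
  induction bits generalizing p q with
  | nil => rfl
  | cons x r ih =>
    have hx : p x = q x := h x (by simp)
    cases hp : p x with
    | true =>
      simp only [freshList, hp, hx ▸ hp, if_pos]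
      exact congrArg _ (ih _ _ (fun y hy => by rw [h y (by simp [hy])]))
    | false =>
      simp only [freshList, hp, hx ▸ hp, Bool.false_eq_true, if_false]
      exact ih _ _ (fun y hy => h y (by simp [hy]))

theorem collectNew_eq (bits : List String) (d : PySem.Dict String Int) (acc : List String) :
    collectNew bits d acc = acc ++ freshList bits (fun x => !(d.contains x) && !(acc.contains x)) := by
  induction bits generalizing acc with
  | nil => simp [collectNew, freshList]
  | cons b rest ih =>
    cases hc : (!(d.contains b) && !(acc.contains b)) with
    | true =>
      simp only [collectNew, freshList, hc, if_pos, ih]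
      rw [freshList_congr rest _ (fun y => (!(d.contains y) && !(acc.contains y)) && !(y == b))
        (fun y _ => by
          by_cases hb : y = b
          · subst hb; simp
          · cases hd : d.contains y <;> cases ha : acc.contains y <;>
              simp [hd, hb])]
      simp
    | false =>
      simp only [collectNew, freshList, hc, Bool.false_eq_true, if_false, ih]

theorem mem_freshList (bits : List String) (p : String → Bool) (x : String)
    (hx : x ∈ bits) (hp : p x = true) : x ∈ freshList bits p := by
  induction bits generalizing p with
  | nil => cases hx
  | cons y r ih =>
    cases hy : p y with
    | true =>
      simp only [freshList, hy, if_pos]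
      by_cases e : x = y
      · simp [e]
      · rcases List.mem_cons.mp hx with e2 | hx2
        · exact absurd e2 e
        · exact List.mem_cons_of_mem _ (ih _ hx2 (by simp [hp, e]))
    | false =>
      have e : x ≠ y := fun h => by rw [h, hy] at hp; cases hp
      simp only [freshList, hy, Bool.false_eq_true, if_false]
      rcases List.mem_cons.mp hx with e2 | hx2
      · exact absurd e2 e
      · exact ih _ hx2 hp

-- Main invariant: A's interleaved loop equals B's arithmetic over the fresh-name list.
theorem go_eq (bits : List String) (d : PySem.Dict String Int) (q : Int) :
    getQasmBitGo bits d q =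
      (bits.map (fun b =>
          match d.get? b with
          | some v => v
          | none => q + (((PySem.List.index? (freshList bits (fun x => !(d.contains x))) b).getD 0 : Nat) : Int)),
       q + ((freshList bits (fun x => !(d.contains x))).length : Int)) := by
  induction bits generalizing d q with
  | nil => simp [getQasmBitGo, freshList]
  | cons b rest ih =>
    by_cases hc : d.contains b = true
    · obtain ⟨v, hv⟩ : ∃ v, d.get? b = some v := by
        rw [PySem.Dict.contains_eq_isSome_get?] at hc
        exact Option.isSome_iff_exists.mp hc
      simp only [getQasmBitGo, hc, Bool.not_true, Bool.false_eq_true, if_false, ih d q,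
        freshList, List.map_cons, hv, PySem.Dict.getD_eq_get?_getD, Option.getD_some]
    · -- fresh name: the head predicate holds, and inserting b into d matches shrinking the predicate
      have hNe : (fun x => !((d.insert b q).contains x))
          = fun y => (!(d.contains y)) && !(y == b) := by
        funext y
        rw [PySem.Dict.contains_insert]
        cases hyb : (y == b) <;> cases d.contains y <;> simp
      have hhead : (!(d.contains b)) = true := by simp [hc]
      have hnone : d.get? b = none := (PySem.Dict.get?_eq_none_iff_contains d b).mpr (by simp [hc])
      simp only [getQasmBitGo, hhead, if_pos, ih (d.insert b q) (q + 1), freshList,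
        List.map_cons, hNe]
      refine Prod.ext ?_ ?_
      · rw [hnone]
        rw [PySem.List.index?_cons_self]
        simp only [Option.getD_some, Nat.cast_zero, add_zero]
        refine congrArg (q :: ·) (List.map_congr_left ?_)
        intro x hx
        by_cases e : x = b
        · subst e
          rw [PySem.Dict.get?_insert_self, hnone, PySem.List.index?_cons_self]
          simp
        · rw [PySem.Dict.get?_insert]
          simp only [e, if_false]
          cases hg : d.get? x with
          | some v => rfl
          | none =>
            have hxp : ((!(d.contains x)) && !(x == b)) = true := by
              rw [PySem.Dict.contains_eq_isSome_get?, hg,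
                show (x == b) = false from beq_eq_false_iff_ne.mpr e]
              rfl
            have hmem : x ∈ freshList rest (fun y => (!(d.contains y)) && !(y == b)) :=
              mem_freshList rest _ x hx hxp
            obtain ⟨k, hk⟩ := Option.isSome_iff_exists.mp
              ((PySem.List.index?_isSome_iff _ _).mpr hmem)
            rw [PySem.List.index?_cons_of_ne _ (Ne.symm e), hk]
            simp only [Option.map_some, Option.getD_some]
            push_cast
            ring
      · simp only [List.length_cons]
        push_cast
        ring

-- ===== VERDICT (by name: the statement is the Claim_ definition above) =====
theorem getQasmBit_spec : Claim_equal_getQasmBit := by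
  intro bits m q _
  unfold Spec_getQasmBit getQasmBit getQasmBit_alt
  simp only [go_eq, collectNew_eq, List.nil_append, List.contains_nil, Bool.not_false,
    Bool.and_true]
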